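-- pv_equiv track=rewrite | github.com/lsteinmeister/HackerRank | Medium/Bus Station.py | solve
-- ===== SOURCE A (Python) =====
-- def solve(a):
--     # a bus can always carry all passengers
--     Sa = sum(a)
--     # seats = [1]
--     # find additional ways to evenly break up the group
--     # find all divisors
--     a_cs = []
--     c_sum = 0
--     for ca in a:
--         c_sum += ca
--         if Sa % c_sum == 0:
--             a_cs.append(c_sum)
--
--     bus_sizes = []
--     for x in a_cs:
--         count = 0
--         check = True
--         for pgr in a:
--             count += pgr
--             if count == x:
--                 count = 0
--             elif count > x:
--                 check = False
--                 break
--         if not check: continue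
--         bus_sizes.append(x)
--     bus_sizes.sort()
--     return bus_sizes
-- ===== SOURCE B (Python) =====
-- def solve(a):
--     Sa = sum(a)
--     # multiplicity of each candidate prefix sum (raises ZeroDivisionError on a zero prefix, like A)
--     mult = {}
--     c = 0
--     for v in a:
--         c += v
--         if Sa % c == 0:
--             mult[c] = mult.get(c, 0) + 1
--     # ONE pass over a, advancing every still-live candidate's current block at once
--     state = {x: 0 for x in mult}
--     for v in a:
--         dead = []
--         for x in state:
--             s = state[x] + v
--             if s == x:
--                 state[x] = 0
--             elif s > x:
--                 dead.append(x)
--             else: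
--                 state[x] = s
--         for x in dead:
--             del state[x]
--     return sorted(x for x in state for _ in range(mult[x]))
-- ===== Notes on version B (the rewrite author's own statement) =====
-- stated objective: alternative
-- what changed: B interchanges the loops: instead of A's per-candidate rescan of a, it makes ONE pass over a maintaining a dict of all still-live candidates' current block sums (eliminating dead ones as it goes) plus a multiplicity counter for duplicate candidates, then emits each surviving candidate with its multiplicity and sorts.
import Mathlib
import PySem

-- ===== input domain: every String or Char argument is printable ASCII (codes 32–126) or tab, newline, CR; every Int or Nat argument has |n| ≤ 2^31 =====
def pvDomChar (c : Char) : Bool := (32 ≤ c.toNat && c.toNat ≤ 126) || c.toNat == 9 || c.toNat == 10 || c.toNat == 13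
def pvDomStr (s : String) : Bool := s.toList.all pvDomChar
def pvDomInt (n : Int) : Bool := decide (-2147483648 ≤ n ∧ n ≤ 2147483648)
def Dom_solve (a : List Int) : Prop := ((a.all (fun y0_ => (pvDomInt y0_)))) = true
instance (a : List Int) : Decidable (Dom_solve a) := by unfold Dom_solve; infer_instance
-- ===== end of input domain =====

-- B interchanges the loops: one pass over a maintaining a dict of all still-live candidates'
-- block sums plus a multiplicity counter, instead of A's per-candidate rescan ('alternative').
-- Return-value equivalence is proved on Pre_ (no zero prefix sum, where Python A raises).

-- ===== PORT A =====
-- first loop: accumulate c_sum over a, collecting divisor prefixes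
def solveCands (a : List Int) (Sa c_sum : Int) (acc : List Int) : List Int :=
  match a with
  | [] => acc
  | ca :: rest =>
      let c := c_sum + ca
      if PySem.Int.mod Sa c == 0 then solveCands rest Sa c (acc ++ [c])
      else solveCands rest Sa c acc

-- inner loop: running count, reset at x, fail above x
def solveCheck (a : List Int) (x count : Int) : Bool :=
  match a with
  | [] => true
  | pgr :: rest =>
      let c := count + pgr
      if c == x then solveCheck rest x 0
      else if c > x then false
      else solveCheck rest x c

-- second loop over the candidates
def solveBuses (cands : List Int) (a : List Int) (acc : List Int) : List Int :=
  match cands with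
  | [] => acc
  | x :: rest =>
      if solveCheck a x 0 then solveBuses rest a (acc ++ [x])
      else solveBuses rest a acc

def solve (a : List Int) : List Int :=
  let Sa := a.sum
  let a_cs := solveCands a Sa 0 []
  let bus_sizes := solveBuses a_cs a []
  PySem.List.sorted bus_sizes (fun x => x) false

-- ===== PORT B =====
-- first loop of Source B: running prefix c, mult[c'] = mult.get(c', 0) + 1 on divisor prefixes
def solveMult (a : List Int) (Sa c : Int) (mult : PySem.Dict Int Int) : PySem.Dict Int Int :=
  match a with
  | [] => mult
  | v :: rest =>
      let c' := c + v
      if PySem.Int.mod Sa c' == 0 then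
        solveMult rest Sa c' (mult.insert c' (mult.getD c' 0 + 1))
      else solveMult rest Sa c' mult

-- body of the single pass: advance every live candidate by v; value updates keep positions,
-- the dead (s > x) collected and deleted afterwards — i.e. a filterMap over the state items
def solveStep (st : List (Int × Int)) (v : Int) : List (Int × Int) :=
  st.filterMap (fun p =>
    let s := p.2 + v
    if s == p.1 then some (p.1, (0 : Int))
    else if s > p.1 then none
    else some (p.1, s))

def solveLoop (a : List Int) (st : List (Int × Int)) : List (Int × Int) :=
  match a with
  | [] => st
  | v :: rest => solveLoop rest (solveStep st v)

def solve_alt (a : List Int) : List Int :=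
  let Sa := a.sum
  let mult := solveMult a Sa 0 PySem.Dict.empty
  let st0 := mult.keys.map (fun x => (x, (0 : Int)))
  let fin := solveLoop a st0
  PySem.List.sorted (fin.flatMap (fun p => List.replicate (mult.getD p.1 0).toNat p.1)) (fun x => x) false

-- ===== PRECONDITION & SPEC =====
-- Pre_ excludes exactly the inputs where some prefix sum is 0: there Python A raises ZeroDivisionError.
def Pre_solve (a : List Int) : Prop :=
  ∀ n ∈ List.range a.length, (a.take (n + 1)).sum ≠ 0
instance (a : List Int) : Decidable (Pre_solve a) := by unfold Pre_solve; infer_instance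

def pvWitness_solve : List Int := [3, 3, 6]

def Spec_solve (a : List Int) (out : List Int) : Prop := out = solve_alt a
instance (a : List Int) (out : List Int) : Decidable (Spec_solve a out) := by unfold Spec_solve; infer_instance

-- ===== CLAIM (what is proved, stated in full; the proofs are below) =====
def Claim_equal_solve : Prop := ∀ (a : List Int), Dom_solve a → Pre_solve a → Spec_solve a (solve a)

-- ===== LEMMAS AND PROOFS =====

-- proof-side helpers
def prefixSums (a : List Int) (s : Int) : List Int :=
  match a with
  | [] => []
  | x :: rest => (s + x) :: prefixSums rest (s + x)

def candList (a : List Int) (Sa c : Int) : List Int :=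
  (prefixSums a c).filter (fun p => PySem.Int.mod Sa p == 0)

-- state of one candidate's scan: final count, none if it died
def runS (a : List Int) (x s : Int) : Option Int :=
  match a with
  | [] => some s
  | v :: rest =>
      let s' := s + v
      if s' == x then runS rest x 0
      else if s' > x then none
      else runS rest x s'

theorem cands_eq (a : List Int) (Sa : Int) : ∀ (s : Int) (acc : List Int),
    solveCands a Sa s acc = acc ++ candList a Sa s := by
  induction a with
  | nil => intro s acc; simp [solveCands, candList, prefixSums]
  | cons ca rest ih =>
      intro s acc
      simp only [solveCands, candList, prefixSums, List.filter]
      by_cases h : (PySem.Int.mod Sa (s + ca) == 0) = true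
      · simp [h, ih, candList, List.append_assoc]
      · simp [h, ih, candList]

theorem buses_eq (cands a : List Int) : ∀ (acc : List Int),
    solveBuses cands a acc = acc ++ cands.filter (fun x => solveCheck a x 0) := by
  induction cands with
  | nil => intro acc; simp [solveBuses]
  | cons x rest ih =>
      intro acc
      simp only [solveBuses, List.filter]
      by_cases h : solveCheck a x 0 = true
      · simp [h, ih, List.append_assoc]
      · simp [h, ih]

theorem check_runS (a : List Int) (x : Int) : ∀ (s : Int),
    solveCheck a x s = (runS a x s).isSome := by
  induction a with
  | nil => intro s; simp [solveCheck, runS]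
  | cons v rest ih =>
      intro s
      simp only [solveCheck, runS]
      by_cases h1 : (s + v == x) = true
      · simp [h1, ih]
      · simp only [h1]
        by_cases h2 : s + v > x
        · simp [h2]
        · simp [h2, ih]

theorem mult_eq (a : List Int) (Sa : Int) : ∀ (c : Int) (d : PySem.Dict Int Int),
    solveMult a Sa c d
      = (candList a Sa c).foldl (fun d x => d.insert x (d.getD x 0 + 1)) d := by
  induction a with
  | nil => intro c d; simp [solveMult, candList, prefixSums]
  | cons v rest ih =>
      intro c d
      simp only [solveMult, candList, prefixSums, List.filter]
      by_cases h : (PySem.Int.mod Sa (c + v) == 0) = true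
      · simp [h, ih, candList]
      · simp [h, ih, candList]

theorem loop_eq (a : List Int) : ∀ (st : List (Int × Int)),
    solveLoop a st
      = st.filterMap (fun p => (runS a p.1 p.2).map (fun s' => (p.1, s'))) := by
  induction a with
  | nil =>
      intro st
      simp [solveLoop, runS]
  | cons v rest ih =>
      intro st
      simp only [solveLoop, solveStep, ih, List.filterMap_filterMap]
      apply List.filterMap_congr
      intro p _
      simp only [runS]
      by_cases h1 : (p.2 + v == p.1) = true
      · simp [h1]
      · simp only [h1]
        by_cases h2 : p.2 + v > p.1
        · simp [h2]
        · simp [h2]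

-- counting lemma: flatten the per-key replicate blocks of a Nodup key list back to a filter
theorem flat_replicate_perm (C : List Int) (chk : Int → Bool) :
    ((PySem.List.dedup C).filter chk).flatMap (fun x => List.replicate (C.count x) x)
      |>.Perm (C.filter chk) := by
  rw [List.perm_iff_count]
  intro y
  have hnd : ((PySem.List.dedup C).filter chk).Nodup :=
    (PySem.List.nodup_dedup C).filter _
  have hmem : ∀ x, x ∈ (PySem.List.dedup C).filter chk ↔ (x ∈ C ∧ chk x = true) := by
    intro x
    simp [List.mem_filter]
  -- compute the count in the flatMap by induction over the (Nodup) filtered key list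
  have main : ∀ (L : List Int), L.Nodup → (∀ x ∈ L, x ∈ C ∧ chk x = true) →
      (L.flatMap (fun x => List.replicate (C.count x) x)).count y
        = if y ∈ L then C.count y else 0 := by
    intro L
    induction L with
    | nil => intro _ _; simp
    | cons x t iht =>
        intro hnd hin
        have hx := hin x (by simp)
        simp only [List.flatMap_cons, List.count_append, List.count_replicate]
        rw [iht (List.Nodup.of_cons hnd) (fun z hz => hin z (List.mem_cons_of_mem _ hz))]
        by_cases hyx : y = x
        · subst hyx
          have : y ∉ t := (List.nodup_cons.mp hnd).1
          simp [this]
        · simp [hyx, Ne.symm hyx, List.mem_cons]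
  rw [main _ hnd (fun x hx => (hmem x).mp hx)]
  by_cases hy : chk y = true
  · by_cases hyC : y ∈ C
    · rw [if_pos ((hmem y).mpr ⟨hyC, hy⟩), List.count_filter hy]
    · rw [if_neg (fun h => hyC ((hmem y).mp h).1),
        List.count_eq_zero_of_not_mem (fun h => hyC (List.mem_of_mem_filter h))]
  · rw [if_neg (fun h => hy ((hmem y).mp h).2),
      List.count_eq_zero_of_not_mem (fun h => hy (List.of_mem_filter h))]

-- ===== VERDICT (by name: the statement is the Claim_ definition above) =====
theorem solve_spec : Claim_equal_solve := by
  intro a _ _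
  unfold Spec_solve solve solve_alt
  simp only []
  set Sa := a.sum with hSa
  set C := candList a Sa 0 with hC
  -- A's list before sorting
  rw [cands_eq, buses_eq, List.nil_append, List.nil_append]
  rw [show (fun x => solveCheck a x 0) = fun x => (runS a x 0).isSome from
    funext (fun x => check_runS a x 0)]
  -- B's dict is the counter of C
  rw [mult_eq, PySem.Dict.foldl_insert_getD_add_one_eq_counter, loop_eq]
  rw [PySem.Dict.keys_counter, ← PySem.List.dedup_eq_ofList]
  -- push the initial map through the filterMap, drop the carried state in the flatMap
  rw [List.filterMap_map]
  simp only [Function.comp_def]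
  have hflat :
      ((PySem.List.dedup C).filterMap
          (fun x => (runS a x 0).map (fun s' => (x, s')))).flatMap
        (fun p => List.replicate ((PySem.Dict.counter C).getD p.1 0).toNat p.1)
        = ((PySem.List.dedup C).filter (fun x => (runS a x 0).isSome)).flatMap
            (fun x => List.replicate (C.count x) x) := by
    induction PySem.List.dedup C with
    | nil => simp
    | cons x t iht =>
        simp only [List.filterMap_cons, List.filter_cons]
        cases hr : runS a x 0 with
        | none => simpa [hr] using iht
        | some s' =>
            simp only [hr, Option.map_some, Option.isSome_some, List.flatMap_cons, if_true]
            rw [iht]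
            simp [PySem.Dict.getD_counter]
  rw [hflat]
  exact (PySem.List.sorted_eq_sorted_of_perm _ _ _ (fun x y h => h)
    (flat_replicate_perm C (fun x => (runS a x 0).isSome))).symm
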